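-- pv_equiv track=rewrite | github.com/BWSI-RACECAR/code-clash-04-EasternProdigy | checkpoints.py | longestdistance
-- ===== SOURCE A (Python) =====
-- def longestdistance(checkpoints):
--     temp_checkpoints = checkpoints
--     max_distance = 0
--     checkpoints = []
--
--     for idx in range(len(temp_checkpoints)):
--         checkpoints.append(min(temp_checkpoints))
--         temp_checkpoints.remove(min(temp_checkpoints))
--     for idx in range(len(checkpoints)):
--         if checkpoints[idx] != (checkpoints[-1]) and abs(checkpoints[idx] - checkpoints[idx+1]) > max_distance:
--             max_distance = abs(checkpoints[idx] - checkpoints[idx+1])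
--     return(max_distance)
-- ===== SOURCE B (Python) =====
-- def longestdistance(checkpoints):
--     # Returns the max gap between consecutive sorted checkpoints.
--     # (Unlike A, does not mutate the argument; equivalence is about the return value.)
--     s = sorted(checkpoints)
--     best = 0
--     for a, b in zip(s, s[1:]):
--         best = max(best, b - a)
--     return best
-- ===== Notes on version B (the rewrite author's own statement) =====
-- stated objective: faster
-- what changed: Replaces A's selection sort (repeated min()+remove(), O(n^2)) and its index loop with a last-element guard by sorted() plus one zip pass taking the max adjacent difference.
import Mathlib
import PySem

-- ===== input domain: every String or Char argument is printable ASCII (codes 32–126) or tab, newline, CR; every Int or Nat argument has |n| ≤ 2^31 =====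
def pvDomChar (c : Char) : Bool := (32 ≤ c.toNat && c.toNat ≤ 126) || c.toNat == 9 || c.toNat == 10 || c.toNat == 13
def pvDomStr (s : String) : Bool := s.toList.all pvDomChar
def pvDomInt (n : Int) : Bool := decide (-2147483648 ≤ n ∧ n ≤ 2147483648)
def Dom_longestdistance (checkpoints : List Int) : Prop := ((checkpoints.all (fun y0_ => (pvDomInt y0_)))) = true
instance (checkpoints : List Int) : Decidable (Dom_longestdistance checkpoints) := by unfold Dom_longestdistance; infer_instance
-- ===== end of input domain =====

-- B replaces A's selection sort (repeated min()+remove()) and guarded index loop by sorted() plus one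
-- zip pass over adjacent pairs (faster). A empties its argument list in place; B does not mutate it —
-- the equivalence proved here is about the return value only.

-- ===== PORT A =====
-- Literal port of A: first loop selection-sorts (append min, remove min), second loop scans indices.
-- Python's checkpoints[idx] / [-1] / [idx+1] are in range whenever evaluated (the [idx+1] access is
-- short-circuited away at the last index), so pyGetD with default 0 is exact here.
def longestdistance (checkpoints : List Int) : Int :=
  let temp_checkpoints := checkpoints
  let st := (PySem.List.pyRange 0 (temp_checkpoints.length : Int) 1).foldl
    (fun (st : List Int × List Int) _ =>
      match PySem.List.min? st.1 (fun x => x) with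
      | some m => ((PySem.List.remove? st.1 m).getD st.1, st.2 ++ [m])
      | none => st)
    (temp_checkpoints, [])
  let cps := st.2
  (PySem.List.pyRange 0 (cps.length : Int) 1).foldl
    (fun md idx =>
      if PySem.List.pyGetD cps idx 0 ≠ PySem.List.pyGetD cps (-1) 0 ∧
         |PySem.List.pyGetD cps idx 0 - PySem.List.pyGetD cps (idx + 1) 0| > md
      then |PySem.List.pyGetD cps idx 0 - PySem.List.pyGetD cps (idx + 1) 0|
      else md)
    0

-- ===== PORT B =====
def longestdistance_alt (checkpoints : List Int) : Int :=
  let s := PySem.List.sorted checkpoints (fun x => x) false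
  (s.zip (PySem.List.slice s (some 1) none)).foldl (fun best p => max best (p.2 - p.1)) 0

-- ===== PRECONDITION & SPEC =====
def Spec_longestdistance (checkpoints : List Int) (out : Int) : Prop := out = longestdistance_alt checkpoints
instance (checkpoints : List Int) (out : Int) : Decidable (Spec_longestdistance checkpoints out) := by unfold Spec_longestdistance; infer_instance

-- ===== CLAIM (what is proved, stated in full; the proofs are below) =====
def Claim_equal_longestdistance : Prop := ∀ (checkpoints : List Int), Dom_longestdistance checkpoints → Spec_longestdistance checkpoints (longestdistance checkpoints)

-- ===== LEMMAS AND PROOFS =====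

-- A's selection step as a named function (proof-only helper).
def pvSelStep (st : List Int × List Int) : List Int × List Int :=
  match PySem.List.min? st.1 (fun x => x) with
  | some m => ((PySem.List.remove? st.1 m).getD st.1, st.2 ++ [m])
  | none => st

lemma pvFoldl_ignore {α β : Type} (f : β → β) :
    ∀ (L : List α) (init : β), L.foldl (fun s _ => f s) init = f^[L.length] init := by
  intro L
  induction L with
  | nil => intro init; rfl
  | cons a t ih => intro init; simp [List.foldl_cons, Function.iterate_succ_apply, ih]

lemma pvSorted_min_cons (l : List Int) (m : Int)
    (hm : PySem.List.min? l (fun x => x) = some m) :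
    PySem.List.sorted l (fun x => x) false
      = m :: PySem.List.sorted (l.erase m) (fun x => x) false := by
  have hmem : m ∈ l := PySem.List.min?_mem hm
  apply PySem.List.sorted_id_eq_of_perm_of_pairwise
  · exact ((PySem.List.sorted_perm (l.erase m) (fun x => x) false).cons m).trans
      (List.perm_cons_erase hmem).symm
  · constructor
    · intro y hy
      exact PySem.List.min?_isMin hm y
        (List.mem_of_mem_erase ((PySem.List.sorted_perm (l.erase m) (fun x => x) false).mem_iff.mp hy))
    · exact PySem.List.sorted_pairwise (l.erase m) (fun x => x)

lemma pvSel_iterate : ∀ (n : Nat) (l acc : List Int), l.length = n →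
    pvSelStep^[n] (l, acc) = ([], acc ++ PySem.List.sorted l (fun x => x) false) := by
  intro n
  induction n with
  | zero =>
    intro l acc hl
    have : l = [] := List.length_eq_zero_iff.mp hl
    subst this
    have : PySem.List.sorted ([] : List Int) (fun x => x) false = [] :=
      (PySem.List.sorted_perm [] (fun x => x) false).eq_nil
    simp [this]
  | succ k ih =>
    intro l acc hl
    have hne : l ≠ [] := by intro h; subst h; simp at hl
    obtain ⟨m, hm⟩ : ∃ m, PySem.List.min? l (fun x => x) = some m := by
      cases h : PySem.List.min? l (fun x => x) with
      | none => exact absurd ((PySem.List.min?_eq_none_iff l (fun x => x)).mp h) hne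
      | some m => exact ⟨m, rfl⟩
    have hmem : m ∈ l := PySem.List.min?_mem hm
    have hstep : pvSelStep (l, acc) = (l.erase m, acc ++ [m]) := by
      simp [pvSelStep, hm, PySem.List.remove?_eq_some_erase l m hmem]
    have hlen : (l.erase m).length = k := by
      have := List.length_erase_of_mem hmem; omega
    rw [Function.iterate_succ_apply, hstep, ih _ _ hlen, pvSorted_min_cons l m hm]
    simp

-- last element of a nonempty list via pyGetD (-1)
lemma pvLast_eq (s : List Int) (h : 0 < s.length) :
    PySem.List.pyGetD s (-1) 0 = s.getD (s.length - 1) 0 := by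
  have hne : s ≠ [] := by intro hs; subst hs; simp at h
  rw [PySem.List.pyGetD, PySem.List.pyGet?_neg_one, List.getLast?_eq_getElem?]
  simp [List.getD_eq_getElem?_getD]

-- core: on a sorted list, A's guarded index step equals the running-max-of-gaps step
lemma pvPhase2_gen (s : List Int) (hs : s.Pairwise (· ≤ ·)) :
    ∀ (L : List Nat) (md : Int), 0 ≤ md → (∀ kk ∈ L, kk + 1 < s.length) →
    L.foldl (fun md k =>
        if s.getD k 0 ≠ PySem.List.pyGetD s (-1) 0 ∧
           |s.getD k 0 - s.getD (k + 1) 0| > md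
        then |s.getD k 0 - s.getD (k + 1) 0| else md) md
      = L.foldl (fun b k => max b (s.getD (k + 1) 0 - s.getD k 0)) md := by
  intro L
  induction L with
  | nil => intro md _ _; rfl
  | cons k t ih =>
    intro md hmd hmem
    have hk1 : k + 1 < s.length := hmem k (by simp)
    have hk : k < s.length := by omega
    have hpos : 0 < s.length := by omega
    have hgetk : s.getD k 0 = s[k] := List.getD_eq_getElem s 0 hk
    have hgetk1 : s.getD (k + 1) 0 = s[k + 1] := List.getD_eq_getElem s 0 hk1
    have hle : s[k] ≤ s[k + 1] :=
      List.pairwise_iff_getElem.mp hs k (k + 1) hk hk1 (by omega)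
    have habs : |s.getD k 0 - s.getD (k + 1) 0| = s.getD (k + 1) 0 - s.getD k 0 := by
      rw [hgetk, hgetk1, abs_sub_comm, abs_of_nonneg (by omega)]
    have hlast : PySem.List.pyGetD s (-1) 0 = s.getD (s.length - 1) 0 := pvLast_eq s hpos
    by_cases hx : s.getD k 0 = PySem.List.pyGetD s (-1) 0
    · -- s[k] equals the last (max) element: the gap to the right is 0, both steps keep md
      have hlastle : s[k + 1] ≤ s[s.length - 1] := by
        rcases Nat.lt_or_ge (k + 1) (s.length - 1) with h | h
        · exact List.pairwise_iff_getElem.mp hs (k + 1) (s.length - 1) hk1 (by omega) h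
        · have : k + 1 = s.length - 1 := by omega
          simp [this]
      have heq : s.getD (k + 1) 0 = s.getD k 0 := by
        have hgl : s.getD (s.length - 1) 0 = s[s.length - 1] :=
          List.getD_eq_getElem s 0 (by omega)
        rw [hgetk, hgetk1]
        rw [hx, hlast, hgl] at hgetk
        omega
      have hmax : max md (s.getD (k + 1) 0 - s.getD k 0) = md := by
        rw [heq]; simp; omega
      simp only [List.foldl_cons]
      rw [if_neg (fun h => h.1 hx), hmax]
      exact ih md hmd (fun kk hkk => hmem kk (by simp [hkk]))
    · have hstep : (if s.getD k 0 ≠ PySem.List.pyGetD s (-1) 0 ∧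
           |s.getD k 0 - s.getD (k + 1) 0| > md
        then |s.getD k 0 - s.getD (k + 1) 0| else md)
          = max md (s.getD (k + 1) 0 - s.getD k 0) := by
        rw [habs]
        by_cases hgt : s.getD (k + 1) 0 - s.getD k 0 > md
        · rw [if_pos ⟨hx, hgt⟩]; exact (max_eq_right hgt.le).symm
        · rw [if_neg (fun h => hgt h.2)]; exact (max_eq_left (by omega)).symm
      simp only [List.foldl_cons, hstep]
      have hmd' : 0 ≤ max md (s.getD (k + 1) 0 - s.getD k 0) := le_trans hmd (le_max_left _ _)
      exact ih _ hmd' (fun kk hkk => hmem kk (by simp [hkk]))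

lemma pvZip_tail (s : List Int) :
    s.zip s.tail = (List.range (s.length - 1)).map (fun k => (s.getD k 0, s.getD (k + 1) 0)) := by
  apply List.ext_getElem
  · simp only [List.length_zip, List.length_tail, List.length_map, List.length_range]; omega
  · intro i h1 h2
    have hlen : i < s.length - 1 := by simpa using h2
    have hi : i < s.length := by omega
    have hi1 : i + 1 < s.length := by omega
    simp only [List.getElem_zip, List.getElem_tail, List.getElem_map, List.getElem_range]
    rw [List.getD_eq_getElem s 0 hi, List.getD_eq_getElem s 0 hi1]

-- ===== VERDICT (by name: the statement is the Claim_ definition above) =====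
theorem longestdistance_spec : Claim_equal_longestdistance := by
  intro checkpoints _
  unfold Spec_longestdistance longestdistance longestdistance_alt
  simp only [PySem.List.slice_from_one]
  -- phase 1: the selection loop produces the sorted list
  set s := PySem.List.sorted checkpoints (fun x => x) false with hs
  have hsel : (PySem.List.pyRange 0 (checkpoints.length : Int) 1).foldl
      (fun (st : List Int × List Int) _ =>
        match PySem.List.min? st.1 (fun x => x) with
        | some m => ((PySem.List.remove? st.1 m).getD st.1, st.2 ++ [m])
        | none => st)
      (checkpoints, []) = ([], s) := by
    have := pvFoldl_ignore pvSelStep (PySem.List.pyRange 0 (checkpoints.length : Int) 1)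
      (checkpoints, [])
    simp only [pvSelStep] at this
    rw [this, PySem.List.length_pyRange_one]
    have h0 : ((checkpoints.length : Int) - 0).toNat = checkpoints.length := by omega
    rw [h0, pvSel_iterate checkpoints.length checkpoints [] rfl]
    simp [hs]
  rw [hsel]
  -- phase 2: the index loop on the sorted list s
  have hsort : s.Pairwise (· ≤ ·) := PySem.List.sorted_pairwise checkpoints (fun x => x)
  rw [PySem.List.pyRange_zero_natCast s.length, List.foldl_map]
  have hcast : ∀ (k : Nat) (md : Int),
      (if PySem.List.pyGetD s (k : Int) 0 ≠ PySem.List.pyGetD s (-1) 0 ∧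
          |PySem.List.pyGetD s (k : Int) 0 - PySem.List.pyGetD s ((k : Int) + 1) 0| > md
       then |PySem.List.pyGetD s (k : Int) 0 - PySem.List.pyGetD s ((k : Int) + 1) 0| else md)
      = (if s.getD k 0 ≠ PySem.List.pyGetD s (-1) 0 ∧
          |s.getD k 0 - s.getD (k + 1) 0| > md
       then |s.getD k 0 - s.getD (k + 1) 0| else md) := by
    intro k md
    have h1 : ((k : Int) + 1) = ((k + 1 : Nat) : Int) := by push_cast; ring
    rw [h1, PySem.List.pyGetD_natCast, PySem.List.pyGetD_natCast]
  simp only [hcast]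
  rw [pvZip_tail, List.foldl_map]
  cases hn : s.length with
  | zero => simp [List.length_eq_zero_iff.mp hn]
  | succ n =>
    rw [List.range_succ, List.foldl_append]
    have hlastid : ∀ md : Int, 0 ≤ md →
        (if s.getD n 0 ≠ PySem.List.pyGetD s (-1) 0 ∧
            |s.getD n 0 - s.getD (n + 1) 0| > md
         then |s.getD n 0 - s.getD (n + 1) 0| else md) = md := by
      intro md _
      have hlastv : s.getD n 0 = PySem.List.pyGetD s (-1) 0 := by
        rw [pvLast_eq s (by omega), hn]; norm_num
      rw [if_neg (fun h => h.1 hlastv)]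
    have hmem : ∀ kk ∈ List.range n, kk + 1 < s.length := by
      intro kk hkk; rw [hn]; have := List.mem_range.mp hkk; omega
    have hmain := pvPhase2_gen s hsort (List.range n) 0 le_rfl hmem

    -- the A-side fold stays ≥ 0, so the extra last step is the identity
    have hnonneg : ∀ (L : List Nat) (md : Int), 0 ≤ md → 0 ≤
        L.foldl (fun md k =>
          if s.getD k 0 ≠ PySem.List.pyGetD s (-1) 0 ∧
             |s.getD k 0 - s.getD (k + 1) 0| > md
          then |s.getD k 0 - s.getD (k + 1) 0| else md) md := by
      intro L
      induction L with
      | nil => intro md hmd; simpa using hmd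
      | cons a t ih =>
        intro md hmd
        simp only [List.foldl_cons]
        apply ih
        split
        · exact abs_nonneg _
        · exact hmd
    simp only [Nat.add_sub_cancel, List.foldl_cons, List.foldl_nil]
    rw [hlastid _ (hnonneg (List.range n) 0 le_rfl)]
    exact hmain
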